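-- pv_equiv track=rewrite | github.com/shubhams-git/xero-integration | auth_token_generator.py | upsert_env_key
-- ===== SOURCE A (Python) =====
-- from typing import Dict, List, Optional, Tuple
--
-- def parse_env_line(line: str) -> Optional[Tuple[str, str, str]]:
--
--     """
--
--     Parse a line like KEY=VALUE (supports quotes). Returns (key, value, sep)
--
--     sep is the exact separator including '=' and any spaces so we can rewrite in place.
--
--     Returns None if not a simple assignment line.
--
--     """
--
--     stripped = line.lstrip()
--
--     if not stripped or stripped.startswith("#"):
--
--         return None
--
--     # very simple parser: KEY[spaces]=[spaces]VALUE
--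
--     if "=" not in line:
--
--         return None
--
--     before, after = line.split("=", 1)
--
--     key = before.strip()
--
--     if not key or " " in key or "\t" in key:
--
--         return None
--
--     sep = line[len(before):len(before)+1]  # the '='
--
--     # Preserve any spaces around '=' in sep_ext
--
--     # Recompute sep with spaces to keep original formatting
--
--     # Find index of '=' in original line
--
--     eq_idx = line.find("=")
--
--     sep_ext = line[len(before): eq_idx + 1]
--
--     value = after.rstrip("\n")
--
--     return key, value, sep_ext
--
-- def upsert_env_key(lines: List[str], key: str, value: str) -> List[str]:
--
--     """
--
--     Update key if exists (first match), else append. Preserve formatting where possible.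
--
--     """
--
--     updated = False
--
--     out: List[str] = []
--
--     for line in lines:
--
--         parsed = parse_env_line(line)
--
--         if parsed:
--
--             k, v, sep = parsed
--
--             if k == key and not updated:
--
--                 # normalize to KEY=VALUE (no added quotes)
--
--                 out.append(f"{k}{sep}{value}\n")
--
--                 updated = True
--
--             else:
--
--                 out.append(line)
--
--         else:
--
--             out.append(line)
--
--     if not updated:
--
--         # Ensure nice spacing and newline between blocks
--
--         if out and not out[-1].endswith("\n"):
--
--             out[-1] = out[-1] + "\n"
--
--         out.append(f"{key}={value}\n")
--
--     return out
-- ===== SOURCE B (Python) =====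
-- from typing import Dict, List, Optional, Tuple
--
-- def parse_env_line(line: str) -> Optional[Tuple[str, str, str]]:
--     stripped = line.lstrip()
--     if not stripped or stripped.startswith("#"):
--         return None
--     if "=" not in line:
--         return None
--     before, after = line.split("=", 1)
--     key = before.strip()
--     if not key or " " in key or "\t" in key:
--         return None
--     eq_idx = line.find("=")
--     sep_ext = line[len(before): eq_idx + 1]
--     value = after.rstrip("\n")
--     return key, value, sep_ext
--
-- def upsert_env_key(lines: List[str], key: str, value: str) -> List[str]:
--     # Locate phase: index and separator of the first line assigning `key`.
--     hit = next(
--         ((i, p[2]) for i, p in enumerate(map(parse_env_line, lines))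
--          if p is not None and p[0] == key),
--         None,
--     )
--     if hit is not None:
--         # Build phase: splice the rewritten line in by slice concatenation.
--         i, sep = hit
--         return lines[:i] + [f"{key}{sep}{value}\n"] + lines[i + 1:]
--     out = list(lines)
--     if out and not out[-1].endswith("\n"):
--         out[-1] = out[-1] + "\n"
--     out.append(f"{key}={value}\n")
--     return out
-- ===== Notes on version B (the rewrite author's own statement) =====
-- stated objective: alternative
-- what changed: Replaced A's single flag-carrying accumulator pass over all lines by a locate-then-reconstruct decomposition: a first-match search (next over an enumerate generator) finds the index and separator of the line assigning the key, and the output is built by slice concatenation lines[:i] + [rewritten] + lines[i+1:], with the append branch only when no match exists.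
import Mathlib
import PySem

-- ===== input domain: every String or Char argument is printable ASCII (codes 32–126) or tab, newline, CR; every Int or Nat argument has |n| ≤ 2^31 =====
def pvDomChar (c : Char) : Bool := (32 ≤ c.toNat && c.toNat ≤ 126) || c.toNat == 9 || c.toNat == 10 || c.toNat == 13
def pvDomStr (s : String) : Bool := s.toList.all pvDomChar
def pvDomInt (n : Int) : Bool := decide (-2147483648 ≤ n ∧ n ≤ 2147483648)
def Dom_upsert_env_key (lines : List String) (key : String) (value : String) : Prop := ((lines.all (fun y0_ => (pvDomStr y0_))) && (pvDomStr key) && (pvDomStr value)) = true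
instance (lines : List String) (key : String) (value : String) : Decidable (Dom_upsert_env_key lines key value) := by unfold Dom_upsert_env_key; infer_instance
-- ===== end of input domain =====

-- B replaces A's flag-carrying accumulator pass by a locate-then-reconstruct decomposition
-- (first-match search, then slice concatenation); objective: alternative structure, same cost.

-- ===== PORT A =====
-- shared module helper parse_env_line (used verbatim by both A and B)
-- after.rstrip("\n"): strip trailing '\n' characters only (exact hand port; PySem has no right-only stripChars)
def pvRstripNl (s : String) : String :=
  String.ofList ((s.toList.reverse.dropWhile (· == '\n')).reverse)

def parse_env_line (line : String) : Option (String × String × String) :=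
  let stripped := PySem.Str.lstrip line
  if stripped = "" || PySem.Str.startswith stripped "#" then none
  else if !(PySem.Str.isIn "=" line) then none
  else
    match PySem.Str.splitMax? line "=" 1 with
    | some [before, after] =>
      let key := PySem.Str.strip before
      if key = "" || PySem.Str.isIn " " key || PySem.Str.isIn "\t" key then none
      else
        let eq_idx := PySem.Str.find line "="
        let sep_ext := PySem.Str.slice line (some (PySem.Str.len before)) (some (eq_idx + 1))
        let value := pvRstripNl after
        some (key, value, sep_ext)
    | _ => none   -- unreachable: '=' ∈ line gives exactly two pieces

-- the loop body of A's for-loop, state (updated, out)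
def pvStepA (key value : String) (st : Bool × List String) (line : String) : Bool × List String :=
  match parse_env_line line with
  | some (k, _v, sep) =>
    if k == key && !st.1 then (true, st.2 ++ [PySem.Str.join "" [k, sep, value, "\n"]])
    else (st.1, st.2 ++ [line])
  | none => (st.1, st.2 ++ [line])

-- "if out and not out[-1].endswith('\n'): out[-1] = out[-1] + '\n'"
def pvPatchLast (out : List String) : List String :=
  match out.getLast? with
  | some last =>
    if !(PySem.Str.endswith last "\n") then out.dropLast ++ [PySem.Str.join "" [last, "\n"]]
    else out
  | none => out

def upsert_env_key (lines : List String) (key : String) (value : String) : List String :=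
  let st := lines.foldl (pvStepA key value) (false, [])
  if st.1 then st.2
  else pvPatchLast st.2 ++ [PySem.Str.join "" [key, "=", value, "\n"]]

-- ===== PORT B =====
-- locate phase: index of the first line parsing to `key`, together with its sep
def pvLocate (key : String) : List String → Nat → Option (Nat × String)
  | [], _ => none
  | l :: ls, i =>
    match parse_env_line l with
    | some (k, _v, sep) => if k == key then some (i, sep) else pvLocate key ls (i + 1)
    | none => pvLocate key ls (i + 1)

def upsert_env_key_alt (lines : List String) (key : String) (value : String) : List String :=
  match pvLocate key lines 0 with
  | some (i, sep) =>
    -- lines[:i] + [f"{key}{sep}{value}\n"] + lines[i+1:]  (i ≥ 0, so take/drop)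
    lines.take i ++ [PySem.Str.join "" [key, sep, value, "\n"]] ++ lines.drop (i + 1)
  | none => pvPatchLast lines ++ [PySem.Str.join "" [key, "=", value, "\n"]]

-- ===== PRECONDITION & SPEC =====
def Spec_upsert_env_key (lines : List String) (key : String) (value : String) (out : List String) : Prop := out = upsert_env_key_alt lines key value
instance (lines : List String) (key : String) (value : String) (out : List String) : Decidable (Spec_upsert_env_key lines key value out) := by unfold Spec_upsert_env_key; infer_instance

-- ===== CLAIM (what is proved, stated in full; the proofs are below) =====
def Claim_equal_upsert_env_key : Prop := ∀ (lines : List String) (key : String) (value : String), Dom_upsert_env_key lines key value → Spec_upsert_env_key lines key value (upsert_env_key lines key value)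

-- ===== LEMMAS AND PROOFS =====

-- cons-form of A's loop, for reasoning about the foldl
def pvScanA (key value : String) : List String → Bool → Bool × List String
  | [], u => (u, [])
  | l :: ls, u =>
    match parse_env_line l with
    | some (k, _v, sep) =>
      if k == key && !u then
        let r := pvScanA key value ls true
        (r.1, PySem.Str.join "" [k, sep, value, "\n"] :: r.2)
      else
        let r := pvScanA key value ls u
        (r.1, l :: r.2)
    | none =>
      let r := pvScanA key value ls u
      (r.1, l :: r.2)

theorem pvFoldA_eq_scanA (key value : String) (ls : List String) :
    ∀ (u : Bool) (acc : List String),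
      ls.foldl (pvStepA key value) (u, acc)
        = ((pvScanA key value ls u).1, acc ++ (pvScanA key value ls u).2) := by
  induction ls with
  | nil => intro u acc; simp [pvScanA]
  | cons l ls ih =>
    intro u acc
    rw [List.foldl_cons]
    rcases h : parse_env_line l with _ | ⟨k, v, sep⟩
    · rw [show pvStepA key value (u, acc) l = (u, acc ++ [l]) by simp [pvStepA, h]]
      rw [ih]
      simp [pvScanA, h]
    · by_cases hk : (k == key && !u) = true
      · rw [show pvStepA key value (u, acc) l
            = (true, acc ++ [PySem.Str.join "" [k, sep, value, "\n"]]) by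
          simp [pvStepA, h, hk]]
        rw [ih]
        simp [pvScanA, h, hk]
      · rw [show pvStepA key value (u, acc) l = (u, acc ++ [l]) by simp [pvStepA, h, hk]]
        rw [ih]
        simp [pvScanA, h, hk]

theorem pvScanA_true (key value : String) (ls : List String) :
    pvScanA key value ls true = (true, ls) := by
  induction ls with
  | nil => simp [pvScanA]
  | cons l ls ih =>
    rcases h : parse_env_line l with _ | ⟨k, v, sep⟩ <;> simp [pvScanA, h, ih]

theorem pvScanA_none (key value : String) (ls : List String) :
    ∀ i, pvLocate key ls i = none → pvScanA key value ls false = (false, ls) := by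
  induction ls with
  | nil => intro i _; simp [pvScanA]
  | cons l ls ih =>
    intro i hloc
    simp only [pvLocate] at hloc
    rcases h : parse_env_line l with _ | ⟨k, v, sep⟩ <;> simp only [h] at hloc
    · simp [pvScanA, h, ih _ hloc]
    · by_cases hk : (k == key) = true
      · rw [if_pos hk] at hloc; exact absurd hloc (by simp)
      · rw [if_neg hk] at hloc
        simp [pvScanA, h, hk, ih _ hloc]

theorem pvScanA_some (key value : String) (ls : List String) :
    ∀ i j sep, pvLocate key ls i = some (j, sep) →
      i ≤ j ∧ pvScanA key value ls false
        = (true, ls.take (j - i) ++ [PySem.Str.join "" [key, sep, value, "\n"]] ++ ls.drop (j - i + 1)) := by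
  induction ls with
  | nil => intro i j sep h; simp [pvLocate] at h
  | cons l ls ih =>
    intro i j sep hloc
    simp only [pvLocate] at hloc
    rcases h : parse_env_line l with _ | ⟨k, v, sep'⟩ <;> simp only [h] at hloc
    · obtain ⟨hij, hsc⟩ := ih _ _ _ hloc
      refine ⟨by omega, ?_⟩
      have h1 : j - i = (j - (i + 1)) + 1 := by omega
      simp [pvScanA, h, hsc, h1]
    · by_cases hk : (k == key) = true
      · rw [if_pos hk] at hloc
        have hji : j = i ∧ sep = sep' := by
          constructor <;> [injection hloc with h2; skip] <;> simp_all
        obtain ⟨hj, hs⟩ := hji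
        subst hj; subst hs
        refine ⟨le_refl _, ?_⟩
        have hkey : k = key := by simpa using hk
        simp [pvScanA, h, pvScanA_true, hkey]
      · rw [if_neg hk] at hloc
        obtain ⟨hij, hsc⟩ := ih _ _ _ hloc
        refine ⟨by omega, ?_⟩
        have h1 : j - i = (j - (i + 1)) + 1 := by omega
        simp [pvScanA, h, hk, hsc, h1]

-- ===== VERDICT (by name: the statement is the Claim_ definition above) =====
theorem upsert_env_key_spec : Claim_equal_upsert_env_key := by
  intro lines key value _
  unfold Spec_upsert_env_key
  simp only [upsert_env_key, upsert_env_key_alt]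
  rw [pvFoldA_eq_scanA key value lines false []]
  rcases hloc : pvLocate key lines 0 with _ | ⟨j, sep⟩
  · have h := pvScanA_none key value lines 0 hloc
    simp [h]
  · obtain ⟨_, hsc⟩ := pvScanA_some key value lines 0 j sep hloc
    simp [hsc]
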